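-- pv_equiv track=rewrite | github.com/GeoffGroberg/byucodechallenge | byucodechallenge/models.py | __create_col_indexes
-- ===== SOURCE A (Python) =====
-- def __create_col_indexes(row):
--     new_row = ""
--     # add n spaces when there is a number
--     for char in row:
--         if(char.isdigit()):
--             new_row += " " * int(char)
--         else:
--             new_row += char
--     # create a-h indexes using chr(n+97)
--     new_row = {chr(n+97): v for n, v in enumerate(new_row)}
--     return new_row
-- ===== SOURCE B (Python) =====
-- def __create_col_indexes(row):
--     # Pass 1: prefix sums of each character's width (a digit d is worth d slots, else 1).
--     offsets = [0]
--     for char in row: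
--         offsets.append(offsets[-1] + (int(char) if char.isdigit() else 1))
--     # Pass 2: emit each character's block of (key, value) pairs at its precomputed
--     # offset, computing keys arithmetically with chr(offset + 97 + i).
--     pairs = []
--     for char, off in zip(row, offsets):
--         if char.isdigit():
--             pairs.extend((chr(off + 97 + i), " ") for i in range(int(char)))
--         else:
--             pairs.append((chr(off + 97), char))
--     # One dict built at the end from the flat pair list.
--     return dict(pairs)
-- ===== Notes on version B (the rewrite author's own statement) =====
-- stated objective: alternative
-- what changed: B replaces A's expand-to-intermediate-string-then-enumerate pipeline with a prefix-sum pass over character widths followed by a pass that emits each character's block of (key, value) pairs at its precomputed offset (keys computed arithmetically as chr(offset+97+i)), building the dict once at the end from the flat pair list.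
import Mathlib
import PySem

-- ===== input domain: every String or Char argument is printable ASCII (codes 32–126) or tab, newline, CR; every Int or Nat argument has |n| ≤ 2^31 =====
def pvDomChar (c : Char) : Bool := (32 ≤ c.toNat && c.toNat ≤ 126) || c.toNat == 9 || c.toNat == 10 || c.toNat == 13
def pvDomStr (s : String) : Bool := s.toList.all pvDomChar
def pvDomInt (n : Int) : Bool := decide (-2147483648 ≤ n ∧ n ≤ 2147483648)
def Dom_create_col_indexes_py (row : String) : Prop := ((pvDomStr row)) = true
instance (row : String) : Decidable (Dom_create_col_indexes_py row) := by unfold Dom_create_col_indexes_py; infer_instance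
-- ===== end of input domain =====

-- B replaces A's expand-to-string-then-enumerate pipeline with a prefix-sum pass over
-- character widths plus a pass emitting each character's pair block at its precomputed
-- offset, building the dict once at the end ('alternative', same cost).

-- ===== PORT A =====
-- int(char) is guarded by char.isdigit(), so ofChars? is always `some`; `.getD 0` never takes its default
def create_col_indexes_py (row : String) : List (String × String) :=
  let new_row : List Char := row.toList.foldl
    (fun acc c =>
      if PySem.Chars.isdigit c then
        acc ++ PySem.List.pyRepeat [' '] ((PySem.Int.ofChars? [c]).getD 0)
      else
        acc ++ [c]) []
  ((PySem.List.enumerate new_row 0).foldl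
    (fun d p => d.insert (String.ofList [Char.ofNat (p.1 + 97).toNat]) (String.ofList [p.2]))
    (PySem.Dict.empty : PySem.Dict String String)).items

-- ===== PORT B =====
-- offsets[-1] is read with pyGet?; offsets is never empty (it starts as [0]), so `.getD 0`
-- never takes its default.  int(char) is guarded by isdigit as in port A.
def create_col_indexes_py_alt (row : String) : List (String × String) :=
  let offsets : List Int := row.toList.foldl
    (fun acc c =>
      acc ++ [(PySem.List.pyGet? acc (-1)).getD 0 +
        (if PySem.Chars.isdigit c then (PySem.Int.ofChars? [c]).getD 0 else 1)]) [0]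
  let pairs : List (String × String) := (row.toList.zip offsets).foldl
    (fun ps p =>
      if PySem.Chars.isdigit p.1 then
        ps ++ (PySem.List.pyRange 0 ((PySem.Int.ofChars? [p.1]).getD 0) 1).map
          (fun i => (String.ofList [Char.ofNat (p.2 + 97 + i).toNat], " "))
      else
        ps ++ [(String.ofList [Char.ofNat (p.2 + 97).toNat], String.ofList [p.1])]) []
  (pairs.foldl (fun (d : PySem.Dict String String) p => d.insert p.1 p.2)
    (PySem.Dict.empty : PySem.Dict String String)).items

-- ===== PRECONDITION & SPEC =====
def Spec_create_col_indexes_py (row : String) (out : List (String × String)) : Prop := out = create_col_indexes_py_alt row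
instance (row : String) (out : List (String × String)) : Decidable (Spec_create_col_indexes_py row out) := by unfold Spec_create_col_indexes_py; infer_instance

-- ===== CLAIM =====
def Claim_equal_create_col_indexes_py : Prop := ∀ (row : String), Dom_create_col_indexes_py row → Spec_create_col_indexes_py row (create_col_indexes_py row)

-- ===== LEMMAS AND PROOFS =====

-- what a single source char contributes to A's expanded string
def pvExpand (c : Char) : List Char :=
  if PySem.Chars.isdigit c then PySem.List.pyRepeat [' '] ((PySem.Int.ofChars? [c]).getD 0) else [c]

def pvKey (n : Int) : String := String.ofList [Char.ofNat (n + 97).toNat]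

def pvPair (p : Int × Char) : String × String := (pvKey p.1, String.ofList [p.2])

-- a character's width in expanded slots
def pvW (c : Char) : Int :=
  if PySem.Chars.isdigit c then (PySem.Int.ofChars? [c]).getD 0 else 1

-- the running offsets after t, one per remaining character
def pvOffs : List Char → Int → List Int
  | [], _ => []
  | c :: cs, t => (t + pvW c) :: pvOffs cs (t + pvW c)

-- the pair block a character at offset p.2 contributes in B
def pvBlock (p : Char × Int) : List (String × String) :=
  if PySem.Chars.isdigit p.1 then
    (PySem.List.pyRange 0 ((PySem.Int.ofChars? [p.1]).getD 0) 1).map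
      (fun i => (String.ofList [Char.ofNat (p.2 + 97 + i).toNat], " "))
  else [(String.ofList [Char.ofNat (p.2 + 97).toNat], String.ofList [p.1])]

set_option maxRecDepth 10000 in
theorem pv_digit_nonneg (c : Char) (h : PySem.Chars.isdigit c = true) :
    0 ≤ (PySem.Int.ofChars? [c]).getD 0 := by
  simp only [PySem.Chars.isdigit, Bool.and_eq_true, decide_eq_true_eq, Char.le_def] at h
  have h48 : 48 ≤ c.toNat := by
    have := UInt32.le_iff_toNat_le.mp h.1; simpa using this
  have h57 : c.toNat ≤ 57 := by
    have := UInt32.le_iff_toNat_le.mp h.2; simpa using this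
  have hc : c = Char.ofNat c.toNat := by simp [Char.ofNat_toNat]
  rw [hc]
  interval_cases h : c.toNat <;> decide

theorem pv_rep (m : Nat) : ∀ (n : Int),
    (PySem.List.enumerate (List.replicate m ' ') n).map pvPair
      = (List.range m).map (fun (j : Nat) => (pvKey (n + (j : Int)), " ")) := by
  induction m with
  | zero => intro n; simp [PySem.List.enumerate_nil]
  | succ m ih =>
      intro n
      rw [List.replicate_succ, PySem.List.enumerate_cons, List.range_succ_eq_map]
      simp only [List.map_cons, List.map_map, ih]
      refine congrArg₂ _ ?_ ?_
      · simp [pvPair, pvKey]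
      · apply List.map_congr_left
        intro j _
        simp only [Function.comp]
        congr 2
        push_cast
        ring

theorem pv_block_eq (c : Char) (t : Int) :
    pvBlock (c, t) = (PySem.List.enumerate (pvExpand c) t).map pvPair := by
  unfold pvBlock pvExpand
  by_cases h : PySem.Chars.isdigit c = true
  · rw [if_pos h, if_pos h, PySem.List.pyRepeat_singleton, pv_rep,
      PySem.List.pyRange_one, List.map_map, sub_zero]
    apply List.map_congr_left
    intro j _
    simp only [Function.comp]
    refine congrArg₂ _ ?_ rfl
    unfold pvKey
    have : t + 97 + (0 + (j : Int)) = t + (j : Int) + 97 := by ring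
    rw [this]
  · rw [if_neg h, if_neg h, PySem.List.enumerate_cons, PySem.List.enumerate_nil]
    rfl

theorem pv_len_expand (c : Char) : ((pvExpand c).length : Int) = pvW c := by
  unfold pvExpand pvW
  by_cases h : PySem.Chars.isdigit c = true
  · rw [if_pos h, if_pos h, PySem.List.pyRepeat_singleton]
    simp [Int.toNat_of_nonneg (pv_digit_nonneg c h)]
  · rw [if_neg h, if_neg h]
    rfl

theorem pv_offsets_eq : ∀ (cs : List Char) (a : List Int) (t : Int),
    cs.foldl
      (fun acc c =>
        acc ++ [(PySem.List.pyGet? acc (-1)).getD 0 +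
          (if PySem.Chars.isdigit c then (PySem.Int.ofChars? [c]).getD 0 else 1)])
      (a ++ [t])
      = (a ++ [t]) ++ pvOffs cs t := by
  intro cs
  induction cs with
  | nil => intro a t; simp [pvOffs]
  | cons c rest ih =>
      intro a t
      rw [List.foldl_cons, PySem.List.pyGet?_neg_one_append_singleton]
      have hstep : (a ++ [t]) ++ [(some t).getD 0 +
          (if PySem.Chars.isdigit c then (PySem.Int.ofChars? [c]).getD 0 else 1)]
          = (a ++ [t]) ++ [t + pvW c] := by
        unfold pvW; rfl
      rw [hstep, ih (a ++ [t]) (t + pvW c)]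
      simp [pvOffs]

theorem pv_zip_blocks : ∀ (cs : List Char) (t : Int),
    (cs.zip (t :: pvOffs cs t)).flatMap pvBlock
      = (PySem.List.enumerate (cs.flatMap pvExpand) t).map pvPair := by
  intro cs
  induction cs with
  | nil => intro t; simp [PySem.List.enumerate_nil]
  | cons c rest ih =>
      intro t
      have hzip : ((c :: rest).zip (t :: pvOffs (c :: rest) t))
          = (c, t) :: rest.zip ((t + pvW c) :: pvOffs rest (t + pvW c)) := by
        simp [pvOffs]
      rw [hzip, List.flatMap_cons, List.flatMap_cons, PySem.List.enumerate_append,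
        List.map_append, ih, pv_block_eq]
      refine congrArg₂ _ rfl ?_
      rw [pv_len_expand]

theorem create_col_indexes_py_spec : Claim_equal_create_col_indexes_py := by
  unfold Claim_equal_create_col_indexes_py
  intro row _
  unfold Spec_create_col_indexes_py create_col_indexes_py create_col_indexes_py_alt
  have hA : row.toList.foldl
      (fun acc c =>
        if PySem.Chars.isdigit c then
          acc ++ PySem.List.pyRepeat [' '] ((PySem.Int.ofChars? [c]).getD 0)
        else acc ++ [c]) []
      = row.toList.flatMap pvExpand := by
    have : (fun (acc : List Char) (c : Char) =>
        if PySem.Chars.isdigit c then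
          acc ++ PySem.List.pyRepeat [' '] ((PySem.Int.ofChars? [c]).getD 0)
        else acc ++ [c]) = fun acc c => acc ++ pvExpand c := by
      funext acc c
      unfold pvExpand
      split <;> rfl
    rw [this, PySem.List.foldl_append_eq_flatMap]
    simp
  have hOff : row.toList.foldl
      (fun acc c =>
        acc ++ [(PySem.List.pyGet? acc (-1)).getD 0 +
          (if PySem.Chars.isdigit c then (PySem.Int.ofChars? [c]).getD 0 else 1)]) [0]
      = 0 :: pvOffs row.toList 0 := by
    have := pv_offsets_eq row.toList [] 0
    simpa using this
  have hPairs : (row.toList.zip (0 :: pvOffs row.toList 0)).foldl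
      (fun ps p =>
        if PySem.Chars.isdigit p.1 then
          ps ++ (PySem.List.pyRange 0 ((PySem.Int.ofChars? [p.1]).getD 0) 1).map
            (fun i => (String.ofList [Char.ofNat (p.2 + 97 + i).toNat], " "))
        else
          ps ++ [(String.ofList [Char.ofNat (p.2 + 97).toNat], String.ofList [p.1])]) []
      = (row.toList.zip (0 :: pvOffs row.toList 0)).flatMap pvBlock := by
    have : (fun (ps : List (String × String)) (p : Char × Int) =>
        if PySem.Chars.isdigit p.1 then
          ps ++ (PySem.List.pyRange 0 ((PySem.Int.ofChars? [p.1]).getD 0) 1).map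
            (fun i => (String.ofList [Char.ofNat (p.2 + 97 + i).toNat], " "))
        else
          ps ++ [(String.ofList [Char.ofNat (p.2 + 97).toNat], String.ofList [p.1])])
        = fun ps p => ps ++ pvBlock p := by
      funext ps p
      unfold pvBlock
      split <;> rfl
    rw [this, PySem.List.foldl_append_eq_flatMap]
    simp
  simp only [hA, hOff, hPairs, pv_zip_blocks, List.foldl_map]
  rfl
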